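-- pv_equiv track=rewrite | github.com/igunduz/ALSA | naive_pattern_match.py | naive_pattern_matching
-- ===== SOURCE A (Python) =====
-- def naive_pattern_matching(P, T):
--   n = comps = i = 0
--   positions = []
--   found = False
--   while i <= len(T) - len(P):
--     for j in range(len(P)):
--       comps+=1
--       if T[j+i] != P[j]:
--         i+=1
--         break
--       elif T[j+i] == P[j] and j == len(P)-1:
--           found = True
--           n+=1
--           positions.append(i) #append the position
--           i+=1
--           break
--   return found, n, positions, comps
-- ===== SOURCE B (Python) =====
-- def lcp_len(P, T, i):
--     l = 0
--     while l < len(P) and T[i + l] == P[l]: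
--         l += 1
--     return l
--
-- def naive_pattern_matching(P, T):
--     m = len(P)
--     span = len(T) - m + 1  # number of candidate alignments (empty range if T shorter than P)
--     positions = [i for i in range(span) if lcp_len(P, T, i) == m]
--     comps = sum(min(lcp_len(P, T, i) + 1, m) for i in range(span))
--     return len(positions) > 0, len(positions), positions, comps
-- ===== Notes on version B (the rewrite author's own statement) =====
-- stated objective: alternative
-- what changed: Replaces A's single while-loop state machine with an inner for/break by a per-alignment longest-common-prefix helper plus comprehension-style aggregates (positions by filtering alignments, comparison count as a sum of min(lcp+1, len(P))); Pre_ excludes the empty pattern, on which A loops forever.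
import Mathlib
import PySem

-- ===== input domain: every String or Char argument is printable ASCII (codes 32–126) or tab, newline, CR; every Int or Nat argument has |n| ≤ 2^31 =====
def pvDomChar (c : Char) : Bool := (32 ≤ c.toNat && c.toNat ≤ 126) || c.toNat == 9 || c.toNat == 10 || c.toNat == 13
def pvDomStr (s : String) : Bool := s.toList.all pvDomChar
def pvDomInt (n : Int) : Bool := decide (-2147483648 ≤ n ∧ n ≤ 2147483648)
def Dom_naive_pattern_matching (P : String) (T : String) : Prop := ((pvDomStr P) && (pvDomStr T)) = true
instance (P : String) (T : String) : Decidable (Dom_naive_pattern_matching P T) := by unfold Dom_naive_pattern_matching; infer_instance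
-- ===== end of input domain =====

-- B replaces A's while/for/break state machine by a per-alignment longest-common-prefix
-- helper and comprehension-style aggregates (alternative decomposition, same asymptotic cost);
-- Pre_ excludes the empty pattern, on which A loops forever.


-- ===== PORT A =====
-- Inner `for j in range(len(P))` loop with its break/elif-break; returns (comps, matched, i).
-- Python's T[j+i]/P[j] never go out of range on the alignments the while-condition admits,
-- so the in-range access is ported as getD (exact there).
def npmForA (pl tl : List Char) (i : Nat) (j : Nat) (comps : Int) : Int × Bool × Nat :=
  if h : j < pl.length then
    if tl.getD (j + i) ' ' ≠ pl.getD j ' ' then (comps + 1, false, i + 1)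
    else if j = pl.length - 1 then (comps + 1, true, i + 1)
    else npmForA pl tl i (j + 1) (comps + 1)
  else (comps, false, i)
termination_by pl.length - j
decreasing_by omega

-- the while loop; fuel only guards the (excluded) empty-pattern divergence
def npmWhileA (pl tl : List Char) (fuel : Nat) (i : Nat) (found : Bool) (n : Int)
    (pos : List Int) (comps : Int) : Bool × Int × List Int × Int :=
  match fuel with
  | 0 => (found, n, pos, comps)
  | fu + 1 =>
    if (i : Int) ≤ (tl.length : Int) - (pl.length : Int) then
      let r := npmForA pl tl i 0 comps
      if r.2.1 then npmWhileA pl tl fu r.2.2 true (n + 1) (pos ++ [(i : Int)]) r.1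
      else npmWhileA pl tl fu r.2.2 found n pos r.1
    else (found, n, pos, comps)

def naive_pattern_matching (P : String) (T : String) : Bool × Int × List Int × Int :=
  npmWhileA P.toList T.toList (T.toList.length + 2) 0 false 0 [] 0

-- ===== PORT B =====
-- `while l < len(P) and T[i+l] == P[l]: l += 1` (reachable accesses are in range)
def lcpLen (pl tl : List Char) (i : Nat) (l : Nat) : Nat :=
  if h : l < pl.length ∧ tl.getD (i + l) ' ' = pl.getD l ' ' then lcpLen pl tl i (l + 1) else l
termination_by pl.length - l
decreasing_by omega

def naive_pattern_matching_alt (P : String) (T : String) : Bool × Int × List Int × Int :=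
  let pl := P.toList
  let tl := T.toList
  let m := pl.length
  let span := tl.length + 1 - m   -- Python range(len(T)-m+1): empty when nonpositive, exact as Nat sub
  let positions := ((List.range span).filter (fun i => lcpLen pl tl i 0 = m)).map Int.ofNat
  let comps := (List.range span).foldl (fun s i => s + ((min (lcpLen pl tl i 0 + 1) m : Nat) : Int)) 0
  (decide (0 < positions.length), (positions.length : Int), positions, comps)

-- ===== PRECONDITION & SPEC =====
-- Pre_ excludes only the empty pattern, on which A's while loop never increments i and diverges.
def Pre_naive_pattern_matching (P : String) (T : String) : Prop := P ≠ ""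
instance (P : String) (T : String) : Decidable (Pre_naive_pattern_matching P T) := by
  unfold Pre_naive_pattern_matching; infer_instance

def pvWitness_naive_pattern_matching : String × String := ("ab", "cabab")

def Spec_naive_pattern_matching (P : String) (T : String) (out : Bool × Int × List Int × Int) : Prop := out = naive_pattern_matching_alt P T
instance (P : String) (T : String) (out : Bool × Int × List Int × Int) : Decidable (Spec_naive_pattern_matching P T out) := by unfold Spec_naive_pattern_matching; infer_instance

-- ===== CLAIM (what is proved, stated in full; the proofs are below) =====
def Claim_equal_naive_pattern_matching : Prop := ∀ (P : String) (T : String), Dom_naive_pattern_matching P T → Pre_naive_pattern_matching P T → Spec_naive_pattern_matching P T (naive_pattern_matching P T)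

-- ===== LEMMAS AND PROOFS =====

-- lcpLen: one step on a match, stops on a mismatch / end of pattern
theorem lcpLen_step (pl tl : List Char) (i j : Nat) (hj : j < pl.length)
    (hm : tl.getD (j + i) ' ' = pl.getD j ' ') :
    lcpLen pl tl i j = lcpLen pl tl i (j + 1) := by
  rw [lcpLen, dif_pos ⟨hj, by rwa [Nat.add_comm j i] at hm⟩]

theorem lcpLen_stop (pl tl : List Char) (i j : Nat)
    (hm : ¬ (j < pl.length ∧ tl.getD (j + i) ' ' = pl.getD j ' ')) :
    lcpLen pl tl i j = j := by
  rw [lcpLen, dif_neg (by rwa [Nat.add_comm j i] at hm)]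

theorem lcpLen_ge (pl tl : List Char) (i j : Nat) : j ≤ lcpLen pl tl i j := by
  fun_induction lcpLen pl tl i j with
  | case1 l h ih => omega
  | case2 l h => omega

theorem lcpLen_le (pl tl : List Char) (i j : Nat) (hj : j ≤ pl.length) :
    lcpLen pl tl i j ≤ pl.length := by
  fun_induction lcpLen pl tl i j with
  | case1 l h ih => exact ih (by omega)
  | case2 l h => omega

-- the inner for-loop computes the lcp-based comparison count and match flag
theorem npmForA_eq (pl tl : List Char) (i : Nat) :
    ∀ j comps, j < pl.length →
    npmForA pl tl i j comps =
      (comps + ((min (lcpLen pl tl i j + 1 - j) (pl.length - j) : Nat) : Int),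
       decide (lcpLen pl tl i j = pl.length), i + 1) := by
  intro j comps hj
  fun_induction npmForA pl tl i j comps with
  | case1 j comps h hne =>
    have hl : lcpLen pl tl i j = j := lcpLen_stop pl tl i j (by tauto)
    rw [hl]
    have h1 : min (j + 1 - j) (pl.length - j) = 1 := by omega
    have h2 : decide (j = pl.length) = false := by simp; omega
    rw [h1, h2]
    norm_num
  | case2 comps h hset =>
    have h1 : lcpLen pl tl i (pl.length - 1) = lcpLen pl tl i (pl.length - 1 + 1) :=
      lcpLen_step pl tl i (pl.length - 1) h (by simpa using hset)
    have h2 : lcpLen pl tl i (pl.length - 1 + 1) = pl.length - 1 + 1 :=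
      lcpLen_stop pl tl i (pl.length - 1 + 1) (by omega)
    have hl : lcpLen pl tl i (pl.length - 1) = pl.length := by omega
    rw [hl]
    have h3 : min (pl.length + 1 - (pl.length - 1)) (pl.length - (pl.length - 1)) = 1 := by omega
    rw [h3, decide_eq_true rfl]
    norm_num
  | case3 j comps h hset hlast ih =>
    have h1 : lcpLen pl tl i j = lcpLen pl tl i (j + 1) :=
      lcpLen_step pl tl i j h (by simpa using hset)
    have hle := lcpLen_le pl tl i (j + 1) (by omega)
    have hge := lcpLen_ge pl tl i (j + 1)
    rw [ih (by omega), h1]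
    have h4 : comps + 1 + ((min (lcpLen pl tl i (j + 1) + 1 - (j + 1)) (pl.length - (j + 1)) : Nat) : Int)
        = comps + ((min (lcpLen pl tl i (j + 1) + 1 - j) (pl.length - j) : Nat) : Int) := by
      omega
    rw [h4]
  | case4 j comps h => omega

-- shift an additive foldl accumulator
theorem foldl_add_shift (g : Nat → Int) (l : List Nat) (a : Int) :
    l.foldl (fun s i => s + g i) a = a + l.foldl (fun s i => s + g i) 0 := by
  induction l generalizing a with
  | nil => simp
  | cons x xs ih => rw [List.foldl_cons, List.foldl_cons, ih (a + g x), ih (0 + g x)]; ring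

-- the while loop from alignment i0 equals B's aggregates over the remaining alignments
theorem npmWhileA_eq (pl tl : List Char) (hpl : pl ≠ []) :
    ∀ k i0 fuel (found : Bool) (n : Int) (pos : List Int) (comps : Int),
    k ≤ fuel → i0 + k = tl.length + 1 - pl.length ∨ (k = 0 ∧ tl.length + 1 - pl.length ≤ i0) →
    npmWhileA pl tl fuel i0 found n pos comps =
      (let fil := (List.range' i0 k).filter (fun i => lcpLen pl tl i 0 = pl.length)
       (found || decide (0 < fil.length), n + (fil.length : Int),
        pos ++ fil.map Int.ofNat,
        comps + (List.range' i0 k).foldl (fun s i => s + ((min (lcpLen pl tl i 0 + 1) pl.length : Nat) : Int)) 0)) := by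
  have hm : 0 < pl.length := List.length_pos_of_ne_nil hpl
  intro k
  induction k with
  | zero =>
    intro i0 fuel found n pos comps hfuel hk
    have hcond : ¬ ((i0 : Int) ≤ (tl.length : Int) - (pl.length : Int)) := by omega
    cases fuel with
    | zero => simp [npmWhileA]
    | succ fu => simp [npmWhileA, hcond]
  | succ k ih =>
    intro i0 fuel found n pos comps hfuel hk
    obtain ⟨fu, rfl⟩ : ∃ fu, fuel = fu + 1 := ⟨fuel - 1, by omega⟩
    have hcond : (i0 : Int) ≤ (tl.length : Int) - (pl.length : Int) := by omega
    rw [npmWhileA, if_pos hcond, npmForA_eq pl tl i0 0 comps hm]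
    have hrange : List.range' i0 (k + 1) = i0 :: List.range' (i0 + 1) k := List.range'_succ ..
    rw [hrange]
    by_cases hmatch : lcpLen pl tl i0 0 = pl.length
    · rw [show (decide (lcpLen pl tl i0 0 = pl.length)) = true by simp [hmatch]]
      rw [if_pos rfl]
      rw [ih (i0 + 1) fu true (n + 1) (pos ++ [(i0 : Int)]) _ (by omega) (by omega)]
      rw [List.filter_cons_of_pos (by simp [hmatch])]
      dsimp only
      rw [List.foldl_cons, foldl_add_shift _ _ (0 + _), List.map_cons, List.length_cons]
      refine Prod.ext ?_ (Prod.ext ?_ (Prod.ext ?_ ?_)) <;> dsimp only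
      · simp
      · push_cast; ring
      · rw [List.append_assoc, List.singleton_append]
        rfl
      · rw [hmatch]
        generalize (List.range' (i0 + 1) k).foldl
          (fun s i => s + ((min (lcpLen pl tl i 0 + 1) pl.length : Nat) : Int)) 0 = F
        omega
    · rw [show (decide (lcpLen pl tl i0 0 = pl.length)) = false by simp [hmatch]]
      rw [if_neg Bool.false_ne_true]
      rw [ih (i0 + 1) fu found n pos _ (by omega) (by omega)]
      rw [List.filter_cons_of_neg (by simp [hmatch])]
      dsimp only
      rw [List.foldl_cons, foldl_add_shift _ _ (0 + _)]
      refine Prod.ext rfl (Prod.ext rfl (Prod.ext rfl ?_))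
      dsimp only
      have hle := lcpLen_le pl tl i0 0 (by omega)
      generalize (List.range' (i0 + 1) k).foldl
        (fun s i => s + ((min (lcpLen pl tl i 0 + 1) pl.length : Nat) : Int)) 0 = F
      omega

-- ===== VERDICT (by name: the statement is the Claim_ definition above) =====
theorem naive_pattern_matching_spec : Claim_equal_naive_pattern_matching := by
  intro P T _ hpre
  have hpl : P.toList ≠ [] := by
    simpa [Pre_naive_pattern_matching, String.toList_eq_nil_iff] using hpre
  unfold Spec_naive_pattern_matching naive_pattern_matching naive_pattern_matching_alt
  rw [npmWhileA_eq P.toList T.toList hpl (T.toList.length + 1 - P.toList.length) 0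
      (T.toList.length + 2) false 0 [] 0 (by omega) (by omega)]
  simp [← List.range_eq_range']
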